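-- pv_equiv track=rewrite | github.com/kodethon/KoDrive | kodrive/syncthing_factory.py | valid_device_id
-- ===== SOURCE A (Python) =====
-- def valid_device_id(device_id):
--   if len(device_id) != 63:
--     return False
--
--   if device_id.count('-') != 7:
--     return False
--
--   parts = device_id.split('-')
--
--   for part in parts:
--     if len(part) != 7:
--       return False
--
--   return True
-- ===== SOURCE B (Python) =====
-- def valid_device_id(device_id):
--     return len(device_id) == 63 and all(
--         (c == '-') == (i % 8 == 7) for i, c in enumerate(device_id)
--     )
-- ===== Notes on version B (the rewrite author's own statement) =====
-- stated objective: alternative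
-- what changed: Replaces the length/dash-count/split-parts checks with a single positional scan: a 63-char id is valid iff character i is a dash exactly when i % 8 == 7, so no intermediate parts list is built.
import Mathlib
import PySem

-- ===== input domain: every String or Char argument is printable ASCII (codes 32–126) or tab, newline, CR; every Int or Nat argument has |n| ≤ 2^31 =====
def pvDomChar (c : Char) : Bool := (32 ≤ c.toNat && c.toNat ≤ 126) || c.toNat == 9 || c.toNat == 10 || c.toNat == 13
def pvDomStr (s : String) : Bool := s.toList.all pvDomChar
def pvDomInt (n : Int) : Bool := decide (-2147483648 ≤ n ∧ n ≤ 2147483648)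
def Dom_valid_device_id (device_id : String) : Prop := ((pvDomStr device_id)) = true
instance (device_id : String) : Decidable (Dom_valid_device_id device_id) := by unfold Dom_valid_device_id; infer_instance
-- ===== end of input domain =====

-- B replaces A's length/dash-count/split-parts checks by a single positional scan
-- (character i is a dash exactly when i % 8 == 7): an alternative algorithm, same return value.


-- ===== PORT A =====
def valid_device_id (device_id : String) : Bool :=
  if PySem.Str.len device_id != 63 then false
  else if (PySem.Str.count device_id "-" : Int) != 7 then false
  else
    let parts := PySem.Chars.splitOn device_id.toList ['-']
    parts.all (fun part => PySem.Chars.len part == 7)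

-- ===== PORT B =====
def valid_device_id_alt (device_id : String) : Bool :=
  PySem.Str.len device_id == 63 &&
    (PySem.List.enumerate device_id.toList).all
      (fun ic => (ic.2 == '-') == (ic.1 % 8 == 7))

-- ===== PRECONDITION & SPEC =====
def Spec_valid_device_id (device_id : String) (out : Bool) : Prop := out = valid_device_id_alt device_id
instance (device_id : String) (out : Bool) : Decidable (Spec_valid_device_id device_id out) := by unfold Spec_valid_device_id; infer_instance

-- ===== CLAIM (what is proved, stated in full; the proofs are below) =====
def Claim_equal_valid_device_id : Prop := ∀ (device_id : String), Dom_valid_device_id device_id → Spec_valid_device_id device_id (valid_device_id device_id)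

-- ===== LEMMAS AND PROOFS =====

/-- Proof-only model of `PySem.Chars.splitOn.go` for the single-character separator `'-'`. -/
def sp : List Char → List Char → List (List Char)
  | [], cur => [cur.reverse]
  | c :: r, cur => if c = '-' then cur.reverse :: sp r [] else sp r (c :: cur)

theorem sp_go_eq : ∀ (cs cur : List Char) (acc : List (List Char)) (fuel : Nat), cs.length ≤ fuel →
    PySem.Chars.splitOn.go ['-'] fuel cs cur acc = acc.reverse ++ sp cs cur := by
  intro cs
  induction cs with
  | nil =>
    intro cur acc fuel _
    cases fuel <;> simp [PySem.Chars.splitOn.go, sp]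
  | cons c r ih =>
    intro cur acc fuel hf
    cases fuel with
    | zero => simp at hf
    | succ f =>
      by_cases hc : c = '-'
      · subst hc
        simp only [PySem.Chars.splitOn.go, List.isPrefixOf, sp]
        simp [ih _ _ f (by simpa using hf)]
      · simp only [PySem.Chars.splitOn.go, List.isPrefixOf, sp, hc]
        simp [Ne.symm hc, ih _ _ f (by simpa using hf)]

theorem count_go_eq : ∀ (cs : List Char) (acc fuel : Nat), cs.length ≤ fuel →
    PySem.Chars.count.go ['-'] fuel cs acc = acc + cs.count '-' := by
  intro cs
  induction cs with
  | nil => intro acc fuel _; cases fuel <;> simp [PySem.Chars.count.go]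
  | cons c r ih =>
    intro acc fuel hf
    cases fuel with
    | zero => simp at hf
    | succ f =>
      by_cases hc : c = '-'
      · subst hc
        simp only [PySem.Chars.count.go, List.isPrefixOf]
        simp [ih _ f (by simpa using hf)]
        omega
      · simp only [PySem.Chars.count.go, List.isPrefixOf]
        simp [hc, Ne.symm hc, ih _ f (by simpa using hf)]

theorem sp_noDash_prefix : ∀ (p rest cur : List Char), (∀ c ∈ p, c ≠ '-') →
    sp (p ++ rest) cur = sp rest (p.reverse ++ cur) := by
  intro p
  induction p with
  | nil => intro rest cur _; simp
  | cons c q ih =>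
    intro rest cur h
    have hc : c ≠ '-' := h c (by simp)
    simp only [List.cons_append, sp, hc, if_false]
    rw [ih _ _ (fun x hx => h x (by simp [hx]))]
    simp

theorem sp_noDash : ∀ (cs cur : List Char), (∀ c ∈ cs, c ≠ '-') →
    sp cs cur = [cur.reverse ++ cs] := by
  intro cs cur h
  have := sp_noDash_prefix cs [] cur h
  simp only [List.append_nil] at this
  rw [this]
  simp [sp]

theorem sp_first_mem : ∀ (cs cur : List Char),
    (cur.reverse ++ cs.takeWhile (· != '-')) ∈ sp cs cur := by
  intro cs
  induction cs with
  | nil => intro cur; simp [sp]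
  | cons c r ih =>
    intro cur
    by_cases hc : c = '-'
    · subst hc; simp [sp]
    · simp only [sp, if_false, List.takeWhile_cons, bne_iff_ne, ne_eq, hc,
        not_false_eq_true, if_true]
      have := ih (c :: cur)
      simpa using this

theorem takeWhile_len : ∀ (cs : List Char) (k : Nat),
    (cs.takeWhile (· != '-')).length = k → ∀ (hk : k < cs.length),
    (∀ i (h : i < cs.length), i < k → cs[i] ≠ '-') ∧ cs[k] = '-' := by
  intro cs
  induction cs with
  | nil => intro k _ hk; simp at hk
  | cons c r ih =>
    intro k hlen hk
    by_cases hc : c = '-'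
    · subst hc
      simp at hlen
      subst hlen
      simp
    · simp [hc] at hlen
      cases k with
      | zero => omega
      | succ k' =>
        have hk' : k' < r.length := by simpa using hk
        obtain ⟨h1, h2⟩ := ih k' (by omega) hk'
        refine ⟨?_, by simpa using h2⟩
        intro i hi hik
        cases i with
        | zero => simpa using hc
        | succ j =>
          have := h1 j (by simpa using hi) (by omega)
          simpa using this

theorem main_iff : ∀ (n : Nat) (cs : List Char), cs.length = 8 * n + 7 →
    ((cs.count '-' = n ∧ ∀ p ∈ sp cs [], p.length = 7) ↔
      (∀ i (h : i < cs.length), (cs[i] = '-' ↔ i % 8 = 7))) := by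
  intro n
  induction n with
  | zero =>
    intro cs hlen
    simp only [Nat.mul_zero, Nat.zero_add] at hlen
    constructor
    · rintro ⟨hcnt, -⟩ i hi
      have hni : '-' ∉ cs := List.count_eq_zero.mp hcnt
      have : cs[i] ≠ '-' := fun h => hni (h ▸ List.getElem_mem hi)
      have : i % 8 ≠ 7 := by omega
      constructor
      · intro h; exact absurd h ‹cs[i] ≠ '-'›
      · intro h; exact absurd h this
    · intro h
      have hnd : ∀ c ∈ cs, c ≠ '-' := by
        intro c hc
        obtain ⟨i, hi, rfl⟩ := List.getElem_of_mem hc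
        intro hd
        have := (h i hi).mp hd
        omega
      refine ⟨List.count_eq_zero.mpr (fun hm => hnd _ hm rfl), ?_⟩
      rw [sp_noDash cs [] hnd]
      simpa using hlen
  | succ n ih =>
    intro cs hlen
    have h7 : 7 < cs.length := by omega
    by_cases hC : (∀ i (h : i < cs.length), i < 7 → cs[i] ≠ '-') ∧ cs[7] = '-'
    · obtain ⟨hp, hd7⟩ := hC
      set p := cs.take 7 with hpdef
      set rest := cs.drop 8 with hrdef
      have hplen : p.length = 7 := by simp [hpdef]; omega
      have hrlen : rest.length = 8 * n + 7 := by simp [hrdef]; omega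
      have hpnd : ∀ c ∈ p, c ≠ '-' := by
        intro c hc
        obtain ⟨i, hi, rfl⟩ := List.getElem_of_mem hc
        have hi7 : i < 7 := by omega
        simp only [hpdef, List.getElem_take]
        exact hp i (by omega) hi7
      have hdecomp : cs = p ++ '-' :: rest := by
        conv_lhs => rw [← List.take_append_drop 7 cs]
        rw [List.drop_eq_getElem_cons h7, hd7]
      have hsp : sp cs [] = p :: sp rest [] := by
        rw [hdecomp, sp_noDash_prefix p _ [] hpnd]
        simp [sp]
      have hcnt : cs.count '-' = rest.count '-' + 1 := by
        rw [hdecomp]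
        simp [List.count_append,
          List.count_eq_zero.mpr (fun hm => hpnd _ hm rfl)]
      have hidx : ∀ j (hj : j < rest.length), rest[j] = cs[j + 8]'(by omega) := by
        intro j hj
        simp [hrdef]
        congr 1
        omega
      constructor
      · rintro ⟨h1, h2⟩
        have hrest : ∀ j (hj : j < rest.length), (rest[j] = '-' ↔ j % 8 = 7) := by
          rw [← ih rest hrlen]
          refine ⟨by omega, fun q hq => h2 q (by rw [hsp]; exact List.mem_cons_of_mem _ hq)⟩
        intro i hi
        rcases Nat.lt_or_ge i 7 with hlt | hge
        · have := hp i hi hlt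
          constructor
          · intro h; exact absurd h this
          · intro h; omega
        · rcases Nat.eq_or_lt_of_le hge with rfl | hgt
          · simp [hd7]
          · have hj : i - 8 < rest.length := by omega
            have := hrest (i - 8) hj
            rw [hidx (i - 8) hj] at this
            have hieq : i - 8 + 8 = i := by omega
            simp only [hieq] at this
            rw [this]
            omega
      · intro h
        have hrest : ∀ j (hj : j < rest.length), (rest[j] = '-' ↔ j % 8 = 7) := by
          intro j hj
          rw [hidx j hj]
          have := h (j + 8) (by omega)
          rw [this]
          omega
        have := (ih rest hrlen).mpr hrest
        refine ⟨by omega, ?_⟩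
        rw [hsp]
        intro q hq
        rcases List.mem_cons.mp hq with rfl | hq'
        · exact hplen
        · exact this.2 q hq'
    · have hRC : (∀ i (h : i < cs.length), (cs[i] = '-' ↔ i % 8 = 7)) → False := by
        intro h
        apply hC
        refine ⟨?_, ?_⟩
        · intro i hi hi7 hd
          have := (h i hi).mp hd
          omega
        · exact (h 7 h7).mpr (by norm_num)
      have hLC : (cs.count '-' = n + 1 ∧ ∀ p ∈ sp cs [], p.length = 7) → False := by
        rintro ⟨-, hall⟩
        have hmem := sp_first_mem cs []
        simp only [List.reverse_nil, List.nil_append] at hmem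
        have htw : (cs.takeWhile (· != '-')).length = 7 := hall _ hmem
        obtain ⟨h1, h2⟩ := takeWhile_len cs 7 htw h7
        exact hC ⟨h1, h2⟩
      exact ⟨fun h => absurd h hLC, fun h => absurd h hRC⟩

theorem ports_eq (s : String) : valid_device_id s = valid_device_id_alt s := by
  unfold valid_device_id valid_device_id_alt
  set cs := s.toList with hcs
  by_cases h63 : cs.length = 63
  · have hlen : PySem.Str.len s = 63 := by simp [PySem.Str.len, ← hcs, h63]
    have hcount : (PySem.Str.count s "-" : Int) = (cs.count '-' : Int) := by
      have : ("-" : String).toList = ['-'] := by decide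
      simp only [PySem.Str.count, this, PySem.Chars.count, ← hcs]
      norm_num [count_go_eq cs 0 cs.length le_rfl]
    have hsplit : PySem.Chars.splitOn cs ['-'] = sp cs [] := by
      simp [PySem.Chars.splitOn, sp_go_eq cs [] [] (cs.length + 1) (by omega)]
    rw [hlen, hcount, hsplit]
    simp only [bne_self_eq_false, Bool.false_eq_true, if_false, beq_self_eq_true, Bool.true_and]
    rw [Bool.eq_iff_iff]
    have hm := main_iff 7 cs (by omega)
    constructor
    · intro h
      split_ifs at h with hc
      have hc' : cs.count '-' = 7 := by
        simp only [bne_iff_ne, ne_eq, not_not] at hc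
        exact_mod_cast hc
      simp only [List.all_eq_true, PySem.Chars.len, beq_iff_eq] at h
      have hall : ∀ p ∈ sp cs [], p.length = 7 := by
        intro p hp
        exact_mod_cast h p hp
      have := hm.mp ⟨hc', hall⟩
      simp only [List.all_eq_true]
      intro ic hic
      obtain ⟨k, hk, rfl⟩ := (PySem.List.mem_enumerate_iff cs 0 ic).mp hic
      have hiff := this k hk
      simp only [beq_iff_eq]
      rw [Bool.eq_iff_iff]
      simp only [beq_iff_eq]
      rw [hiff]
      omega
    · intro h
      simp only [List.all_eq_true] at h
      have hidx : ∀ i (hi : i < cs.length), (cs[i] = '-' ↔ i % 8 = 7) := by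
        intro i hi
        have := h (0 + (i : Int), cs[i]) ((PySem.List.mem_enumerate_iff cs 0 _).mpr ⟨i, hi, rfl⟩)
        simp only [beq_iff_eq] at this
        rw [Bool.eq_iff_iff] at this
        simp only [beq_iff_eq] at this
        rw [this]
        omega
      obtain ⟨hc', hall⟩ := hm.mpr hidx
      have : (cs.count '-' : Int) = 7 := by exact_mod_cast hc'
      rw [this]
      simp only [bne_self_eq_false, Bool.false_eq_true, if_false, List.all_eq_true]
      intro p hp
      simp [PySem.Chars.len]
      exact_mod_cast hall p hp
  · have h1 : (PySem.Str.len s != 63) = true := by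
      simp [PySem.Str.len, ← hcs]
      omega
    have h2 : (PySem.Str.len s == 63) = false := by
      simp [PySem.Str.len, ← hcs]
      omega
    rw [h1, h2]
    simp

-- ===== VERDICT (by name: the statement is the Claim_ definition above) =====
theorem valid_device_id_spec : Claim_equal_valid_device_id := by
  intro s _
  unfold Spec_valid_device_id
  exact ports_eq s
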